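-- pv_equiv track=rewrite | github.com/pdwarkanath/MITx-6001 | Old_Problem_Sets/CPE03-Python-Loves-Fruits.py | nfruits
-- ===== SOURCE A (Python) =====
-- def nfruits(fruitPattern,fruitString):
--     if len(fruitString) == 1:
--         biggestValue = 0
--         for i in fruitPattern.keys():
--             if i == fruitString:
--                 fruitPattern[i] -= 1
--             if fruitPattern[i] >= biggestValue:
--                 biggestValue = fruitPattern[i]
--         return biggestValue
--     else:
--         for i in fruitPattern.keys():
--             if i == fruitString[0]:
--                 fruitPattern[i] -= 1
--             else:
--                 fruitPattern[i] += 1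
--         return nfruits(fruitPattern, fruitString[1:])
-- ===== SOURCE B (Python) =====
-- # One pass: count character frequencies of fruitString once, then compute each
-- # key's final value by a closed formula and take the running maximum (A mutates
-- # fruitPattern in place; B does not — equivalence is about the return value).
-- def nfruits(fruitPattern, fruitString):
--     n = len(fruitString)
--     counts = {}
--     for ch in fruitString:
--         counts[ch] = counts.get(ch, 0) + 1
--     last = fruitString[-1]
--     best = 0
--     for k, v in fruitPattern.items():
--         c = counts.get(k, 0)
--         before = c - (1 if k == last else 0)
--         val = v + (n - 1 - before) - c
--         if val > best:
--             best = val
--     return best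
-- ===== Notes on version B (the rewrite author's own statement) =====
-- stated objective: faster
-- what changed: Instead of rewriting every dict value once per character of the string and recursing on string slices, B counts character frequencies in one pass and computes each key's final value by a closed formula, taking the maximum in a single scan of the dict.
import Mathlib
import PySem

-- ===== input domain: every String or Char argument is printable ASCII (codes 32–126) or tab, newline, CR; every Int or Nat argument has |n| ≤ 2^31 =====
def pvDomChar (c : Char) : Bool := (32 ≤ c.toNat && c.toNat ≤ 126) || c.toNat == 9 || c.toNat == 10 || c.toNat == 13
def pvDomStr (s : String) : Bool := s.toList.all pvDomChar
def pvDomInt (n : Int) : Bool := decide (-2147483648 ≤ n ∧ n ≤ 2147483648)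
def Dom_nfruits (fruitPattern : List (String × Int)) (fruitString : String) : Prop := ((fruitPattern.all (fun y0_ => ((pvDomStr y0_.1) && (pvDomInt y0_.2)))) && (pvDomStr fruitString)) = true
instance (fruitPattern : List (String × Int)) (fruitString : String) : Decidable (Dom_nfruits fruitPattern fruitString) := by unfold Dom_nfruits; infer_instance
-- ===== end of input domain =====

-- B counts character frequencies once and evaluates each key by a closed formula (single scan);
-- A mutates fruitPattern in place, B does not — the equivalence proved is about the RETURN value only.

-- ===== PORT A =====
-- Recursion over the characters of fruitString; the dict is the association list
-- (keys distinct under Pre_), updated entry by entry as A's keys() loop does.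
def nfruitsGo : List (String × Int) → List Char → Int
  | _, [] => 0   -- unreachable under Pre_: Python raises IndexError on fruitString[0] for ""
  | fp, [c] =>
      -- len(fruitString) == 1 branch: decrement the matching key, track biggestValue
      fp.foldl (fun biggestValue kv =>
        let v := if kv.1 == String.ofList [c] then kv.2 - 1 else kv.2
        if v ≥ biggestValue then v else biggestValue) 0
  | fp, c :: rest =>
      -- else branch: -1 on the matching key, +1 on every other key, recurse on fruitString[1:]
      nfruitsGo (fp.map (fun kv =>
        if kv.1 == String.ofList [c] then (kv.1, kv.2 - 1) else (kv.1, kv.2 + 1))) rest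

def nfruits (fruitPattern : List (String × Int)) (fruitString : String) : Int :=
  nfruitsGo fruitPattern fruitString.toList

-- ===== PORT B =====
def nfruits_alt (fruitPattern : List (String × Int)) (fruitString : String) : Int :=
  let n : Int := PySem.Str.len fruitString
  let counts : PySem.Dict String Int :=
    PySem.Dict.counter (fruitString.toList.map (fun ch => String.ofList [ch]))
  match PySem.Str.pyGet? fruitString (-1) with
  | none => 0   -- unreachable under Pre_: fruitString[-1] raises IndexError on ""
  | some last =>
      fruitPattern.foldl (fun best kv =>
        let c := counts.getD kv.1 0
        let before := c - (if kv.1 == String.ofList [last] then 1 else 0)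
        let val := kv.2 + (n - 1 - before) - c
        if val > best then val else best) 0

-- ===== PRECONDITION & SPEC =====
-- Pre_ excludes (a) the empty fruitString, on which both A and B raise IndexError, and
-- (b) association lists with duplicate keys, which represent no Python dict (A's parameter
-- is a dict, whose keys are distinct by construction).
def Pre_nfruits (fruitPattern : List (String × Int)) (fruitString : String) : Prop :=
  fruitString.toList ≠ [] ∧ (fruitPattern.map Prod.fst).Nodup
instance (fruitPattern : List (String × Int)) (fruitString : String) : Decidable (Pre_nfruits fruitPattern fruitString) := by unfold Pre_nfruits; infer_instance
def pvWitness_nfruits : (List (String × Int)) × String := ([("a", 3), ("b", -1)], "abca")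

def Spec_nfruits (fruitPattern : List (String × Int)) (fruitString : String) (out : Int) : Prop := out = nfruits_alt fruitPattern fruitString
instance (fruitPattern : List (String × Int)) (fruitString : String) (out : Int) : Decidable (Spec_nfruits fruitPattern fruitString out) := by unfold Spec_nfruits; infer_instance

-- ===== CLAIM (what is proved, stated in full; the proofs are below) =====
def Claim_equal_nfruits : Prop := ∀ (fruitPattern : List (String × Int)) (fruitString : String), Dom_nfruits fruitPattern fruitString → Pre_nfruits fruitPattern fruitString → Spec_nfruits fruitPattern fruitString (nfruits fruitPattern fruitString)

-- ===== LEMMAS AND PROOFS =====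

-- Net adjustment A applies to the value of key k over the character list cs:
-- -1 on a match, +1 on a non-match except the last character, 0 on a non-matching last character.
def pvDelta (k : String) : List Char → Int
  | [] => 0
  | c :: rest =>
      (if k == String.ofList [c] then -1 else if rest.isEmpty then 0 else 1) + pvDelta k rest

-- A's recursion computes the running maximum (with 0) of the adjusted values.
theorem nfruitsGo_eq_foldl_max (cs : List Char) (fp : List (String × Int)) (h : cs ≠ []) :
    nfruitsGo fp cs = fp.foldl (fun b kv => max b (kv.2 + pvDelta kv.1 cs)) 0 := by
  induction cs generalizing fp with
  | nil => exact absurd rfl h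
  | cons c rest ih =>
    cases rest with
    | nil =>
      simp only [nfruitsGo, pvDelta, List.isEmpty_nil]
      congr 1
      funext b kv
      split <;> simp <;> omega
    | cons c2 rest2 =>
      rw [show nfruitsGo fp (c :: c2 :: rest2) =
            nfruitsGo ((fp.map (fun kv =>
              if kv.1 == String.ofList [c] then (kv.1, kv.2 - 1) else (kv.1, kv.2 + 1)))) (c2 :: rest2) from rfl,
          ih _ (by simp), List.foldl_map]
      congr 1
      funext b kv
      simp only [pvDelta, List.isEmpty_cons]
      split <;> simp <;> omega

-- pvDelta in terms of the character count of k in cs (k as a one-character string).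
theorem pvDelta_eq_count (k : String) (cs : List Char) (h : cs ≠ []) :
    pvDelta k cs =
      (cs.length : Int) - 1
        - 2 * ((cs.map (fun ch => String.ofList [ch])).count k : Int)
        + (if k == String.ofList [cs.getLast h] then 1 else 0) := by
  induction cs with
  | nil => exact absurd rfl h
  | cons c rest ih =>
    cases rest with
    | nil =>
      simp only [pvDelta, List.isEmpty_nil, List.map_cons, List.map_nil, List.getLast_singleton]
      rw [List.count_cons]
      simp only [List.count_nil, List.length_cons, List.length_nil]
      by_cases hk : k = String.ofList [c]
      · simp [hk]
      · simp [hk, beq_iff_eq, Ne.symm hk]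
    | cons c2 rest2 =>
      have hrest : (c2 :: rest2 : List Char) ≠ [] := by simp
      simp only [pvDelta, List.isEmpty_cons, List.map_cons] at *
      rw [List.count_cons, ih hrest]
      have hlast : (c :: c2 :: rest2).getLast h = (c2 :: rest2).getLast hrest := by
        simp [List.getLast_cons]
      rw [hlast]
      by_cases hk : k = String.ofList [c]
      · simp only [hk, beq_self_eq_true, if_true, beq_iff_eq]
        simp only [List.length_cons]
        push_cast
        split <;> omega
      · have : ¬ (String.ofList [c] == k) = true := by simp [beq_iff_eq, Ne.symm hk]
        simp only [beq_iff_eq, hk, if_false, this]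
        simp only [List.length_cons]
        push_cast
        split <;> omega

-- B computes the same running maximum.
theorem nfruits_alt_eq_foldl_max (fp : List (String × Int)) (s : String) (h : s.toList ≠ []) :
    nfruits_alt fp s = fp.foldl (fun b kv => max b (kv.2 + pvDelta kv.1 s.toList)) 0 := by
  obtain ⟨lastc, hlast⟩ : ∃ c, s.toList.getLast? = some c := by
    cases hg : s.toList.getLast? with
    | none => exact absurd (List.getLast?_eq_none_iff.mp hg) h
    | some c => exact ⟨c, rfl⟩
  have hget : PySem.Str.pyGet? s (-1) = some lastc := by
    have := PySem.List.pyGet?_neg_one (xs := s.toList)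
    simp only [PySem.Str.pyGet?_eq, PySem.Chars.pyGet?_eq_listPyGet?, this, hlast]
  unfold nfruits_alt
  rw [hget]
  simp only [PySem.Str.len_eq]
  congr 1
  funext b kv
  rw [PySem.Dict.getD_counter]
  rw [pvDelta_eq_count kv.1 s.toList h]
  have hl : s.toList.getLast h = lastc := Option.some.inj ((List.getLast?_eq_some_getLast h).symm.trans hlast)
  rw [hl]
  split <;> omega

-- ===== VERDICT (by name: the statement is the Claim_ definition above) =====
theorem nfruits_spec : Claim_equal_nfruits := by
  intro fp s _ hpre
  unfold Spec_nfruits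
  rw [show nfruits fp s = nfruitsGo fp s.toList from rfl,
      nfruitsGo_eq_foldl_max s.toList fp hpre.1,
      nfruits_alt_eq_foldl_max fp s hpre.1]
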